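-- pv_equiv track=rewrite | github.com/fzinnah17/codepath-weekly-assignments-TIP-102-4b | unit2-session1-2.py | assign_unique_nicknames
-- ===== SOURCE A (Python) =====
-- def assign_unique_nicknames(nicknames):
--     used = set()
--     next_k = {}
--     res = []
--
--     for name in nicknames:
--         if name not in used:
--             assigned = name
--             used.add(assigned)
--             next_k.setdefault(name, 1)
--         else:
--             k = next_k[name]
--             while True:
--                 candidate = f"{name}({k})"
--                 if candidate not in used:
--                     assigned = candidate
--                     used.add(assigned)
--                     next_k[name] = k + 1
--                     next_k.setdefault(candidate, 1)
--                     break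
--                 k += 1
--         res.append(assigned)
--     return res
-- ===== SOURCE B (Python) =====
-- def assign_unique_nicknames(nicknames):
--     used = set()
--     res = []
--     for name in nicknames:
--         if name in used:
--             k = 1
--             candidate = f"{name}(1)"
--             while candidate in used:
--                 k += 1
--                 candidate = f"{name}({k})"
--             used.add(candidate)
--             res.append(candidate)
--         else:
--             used.add(name)
--             res.append(name)
--     return res
-- ===== Notes on version B (the rewrite author's own statement) =====
-- stated objective: simpler
-- what changed: B drops A's next_k dict (the per-name resumed-scan cache and its setdefault bookkeeping) and keeps only the used set, rescanning suffixes from k=1 for each duplicate; since used only grows, the first free suffix found from 1 equals the one A finds from its cached index.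
import Mathlib
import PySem

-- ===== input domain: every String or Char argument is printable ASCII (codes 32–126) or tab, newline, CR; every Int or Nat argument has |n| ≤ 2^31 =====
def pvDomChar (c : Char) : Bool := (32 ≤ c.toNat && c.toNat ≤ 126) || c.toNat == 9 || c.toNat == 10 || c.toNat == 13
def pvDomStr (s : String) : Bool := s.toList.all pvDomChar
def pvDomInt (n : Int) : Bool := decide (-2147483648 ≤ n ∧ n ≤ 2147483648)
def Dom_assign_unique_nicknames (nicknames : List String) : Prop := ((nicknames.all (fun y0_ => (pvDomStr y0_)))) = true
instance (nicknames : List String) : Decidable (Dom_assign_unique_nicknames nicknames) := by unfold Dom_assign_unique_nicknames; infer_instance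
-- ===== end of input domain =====

-- B drops A's `next_k` resumed-scan cache and rescans suffixes from 1 against the `used` set alone (simpler: one set instead of set+dict; same output because `used` only grows).

-- the f-string f"{name}({k})" (shared by both ports)
def pvCand (name : String) (k : Int) : String := name ++ "(" ++ PySem.Int.toStr k ++ ")"

-- ===== PORT A =====
-- A's `while True` search: returns the first k' ≥ k with f"{name}({k'})" not in used.
-- fuel = used.length + 1 always suffices (candidates are pairwise distinct), so the 0-fuel branch is unreachable.
def pvFindA (used : PySem.Set String) (name : String) (k : Int) : Nat → Int
  | 0 => k
  | fuel+1 => if PySem.Set.contains used (pvCand name k) then pvFindA used name (k+1) fuel else k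

def pvStepA (st : PySem.Set String × PySem.Dict String Int × List String) (name : String) :
    PySem.Set String × PySem.Dict String Int × List String :=
  let used := st.1; let nk := st.2.1; let res := st.2.2
  if !(PySem.Set.contains used name) then
    (PySem.Set.add used name, PySem.Dict.setdefault nk name 1, res ++ [name])
  else
    -- Python: k = next_k[name]; every member of `used` is a key of next_k (loop invariant), so getD is exact here
    let k0 := PySem.Dict.getD nk name 1
    let k := pvFindA used name k0 (used.length + 1)
    let cand := pvCand name k
    (PySem.Set.add used cand,
     PySem.Dict.setdefault (PySem.Dict.insert nk name (k+1)) cand 1,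
     res ++ [cand])

def assign_unique_nicknames (nicknames : List String) : List String :=
  (nicknames.foldl pvStepA (PySem.Set.empty, PySem.Dict.empty, [])).2.2

-- ===== PORT B =====
-- B's `while candidate in used` rescan from k = 1; same fuel device, 0-fuel branch unreachable.
def pvFindB (used : PySem.Set String) (name : String) (k : Int) (cand : String) : Nat → String
  | 0 => cand
  | fuel+1 => if PySem.Set.contains used cand then pvFindB used name (k+1) (pvCand name (k+1)) fuel else cand

def pvStepB (st : PySem.Set String × List String) (name : String) : PySem.Set String × List String :=
  if PySem.Set.contains st.1 name then
    let c := pvFindB st.1 name 1 (pvCand name 1) (st.1.length + 1)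
    (PySem.Set.add st.1 c, st.2 ++ [c])
  else
    (PySem.Set.add st.1 name, st.2 ++ [name])

def assign_unique_nicknames_alt (nicknames : List String) : List String :=
  (nicknames.foldl pvStepB (PySem.Set.empty, [])).2

-- ===== PRECONDITION & SPEC =====
def Spec_assign_unique_nicknames (nicknames : List String) (out : List String) : Prop := out = assign_unique_nicknames_alt nicknames
instance (nicknames : List String) (out : List String) : Decidable (Spec_assign_unique_nicknames nicknames out) := by unfold Spec_assign_unique_nicknames; infer_instance

-- ===== CLAIM (what is proved, stated in full; the proofs are below) =====
def Claim_equal_assign_unique_nicknames : Prop := ∀ (nicknames : List String), Dom_assign_unique_nicknames nicknames → Spec_assign_unique_nicknames nicknames (assign_unique_nicknames nicknames)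

-- ===== LEMMAS AND PROOFS =====

theorem pvDigitChar_inj (m n : ℕ) (hm : m < 10) (hn : n < 10)
    (h : Nat.digitChar m = Nat.digitChar n) : m = n := by
  interval_cases m <;> interval_cases n <;> simp_all [Nat.digitChar]

theorem pvToDigits_big (n : ℕ) (hn : ¬ n < 10) :
    Nat.toDigits 10 n = Nat.toDigits 10 (n / 10) ++ [Nat.digitChar (n % 10)] := by
  rw [Nat.toDigits_eq_if (by norm_num)]; simp [hn]

theorem pvToDigits_pos (n : ℕ) : 0 < (Nat.toDigits 10 n).length :=
  Nat.length_toDigits_pos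

theorem pvToDigits_inj (m n : ℕ) (h : Nat.toDigits 10 m = Nat.toDigits 10 n) : m = n := by
  induction m using Nat.strong_induction_on generalizing n with
  | _ m ih =>
  by_cases hm : m < 10 <;> by_cases hn : n < 10
  · rw [Nat.toDigits_of_lt_base hm, Nat.toDigits_of_lt_base hn] at h
    exact pvDigitChar_inj m n hm hn (by simpa using h)
  · rw [Nat.toDigits_of_lt_base hm, pvToDigits_big n hn] at h
    have := congrArg List.length h
    have hp := pvToDigits_pos (n / 10)
    simp only [List.length_append, List.length_cons, List.length_nil] at this; omega
  · rw [pvToDigits_big m hm, Nat.toDigits_of_lt_base hn] at h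
    have := congrArg List.length h
    have hp := pvToDigits_pos (m / 10)
    simp only [List.length_append, List.length_cons, List.length_nil] at this; omega
  · rw [pvToDigits_big m hm, pvToDigits_big n hn] at h
    obtain ⟨h1, h2⟩ := List.append_inj' h (by simp)
    have hd : m / 10 = n / 10 := ih (m / 10) (Nat.div_lt_self (by omega) (by norm_num)) (n / 10) h1
    have hmod : m % 10 = n % 10 := pvDigitChar_inj _ _ (Nat.mod_lt _ (by norm_num)) (Nat.mod_lt _ (by norm_num)) (by simpa using h2)
    omega

theorem pvCand_inj (name : String) (j j' : Int) (hj : 1 ≤ j) (hj' : 1 ≤ j')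
    (h : pvCand name j = pvCand name j') : j = j' := by
  have h' := congrArg String.toList h
  simp only [pvCand, String.toList_append, PySem.Int.toList_toStr] at h'
  have h2 : PySem.Int.toChars j = PySem.Int.toChars j' :=
    List.append_cancel_left (List.append_cancel_right h')
  simp only [PySem.Int.toChars, if_neg (by omega : ¬ j < 0), if_neg (by omega : ¬ j' < 0)] at h2
  have := pvToDigits_inj _ _ h2
  omega

theorem pvPigeon (used : List String) (_hnd : used.Nodup) (name : String)
    (hall : ∀ i : ℕ, i ≤ used.length → pvCand name (1 + (i : Int)) ∈ used) : False := by
  have hnodupL : ((List.range (used.length + 1)).map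
      (fun (i : ℕ) => pvCand name (1 + (i : Int)))).Nodup := by
    refine List.Nodup.map_on ?_ (List.nodup_range)
    intro a _ b _ hab
    have := pvCand_inj name (1 + (a : Int)) (1 + (b : Int)) (by omega) (by omega) hab
    omega
  have hsub : ((List.range (used.length + 1)).map
      (fun (i : ℕ) => pvCand name (1 + (i : Int)))) ⊆ used := by
    intro x hx
    obtain ⟨i, hi, rfl⟩ := List.mem_map.mp hx
    exact hall i (Nat.lt_succ_iff.mp (List.mem_range.mp hi))
  have := List.Subperm.length_le (List.subperm_of_subset hnodupL hsub)
  simp at this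

theorem pvLeastFree (used : List String) (hnd : used.Nodup) (name : String) :
    ∃ f : Int, 1 ≤ f ∧ f ≤ 1 + (used.length : Int) ∧ pvCand name f ∉ used ∧
      ∀ j : Int, 1 ≤ j → j < f → pvCand name j ∈ used := by
  have hex : ∃ i : ℕ, pvCand name (1 + (i : Int)) ∉ used := by
    by_contra hall
    push_neg at hall
    exact pvPigeon used hnd name (fun i _ => hall i)
  classical
  refine ⟨1 + (Nat.find hex : Int), by omega, ?_, Nat.find_spec hex, ?_⟩
  · by_contra hgt
    push_neg at hgt
    refine pvPigeon used hnd name (fun i hi => ?_)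
    by_contra hfree
    have := Nat.find_min' hex hfree
    omega
  · intro j hj1 hjf
    have hji : j = 1 + ((j - 1).toNat : Int) := by omega
    have hlt : (j - 1).toNat < Nat.find hex := by omega
    have := Nat.find_min hex hlt
    rw [hji]
    by_contra hc
    exact this hc

theorem pvFindA_spec (used : PySem.Set String) (name : String) (k f : Int) (fuel : ℕ)
    (hkf : k ≤ f) (hfuel : f < k + fuel) (hfree : pvCand name f ∉ used)
    (hbelow : ∀ j : Int, k ≤ j → j < f → pvCand name j ∈ used) :
    pvFindA used name k fuel = f := by
  induction fuel generalizing k with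
  | zero => omega
  | succ fuel ih =>
    by_cases hc : pvCand name k ∈ used
    · have hkne : k ≠ f := fun he => hfree (he ▸ hc)
      simp only [pvFindA, PySem.Set.contains_eq_listContains, List.contains_iff_mem, hc, if_true]
      exact ih (k + 1) (by omega) (by omega) (fun j hj1 hj2 => hbelow j (by omega) hj2)
    · have hkf' : k = f := by
        by_contra hne
        exact hc (hbelow k (by omega) (by omega))
      simp only [pvFindA, PySem.Set.contains_eq_listContains, List.contains_iff_mem, hc, if_false]
      exact hkf'

theorem pvFindB_spec (used : PySem.Set String) (name : String) (k f : Int) (fuel : ℕ)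
    (hkf : k ≤ f) (hfuel : f < k + fuel) (hfree : pvCand name f ∉ used)
    (hbelow : ∀ j : Int, k ≤ j → j < f → pvCand name j ∈ used) :
    pvFindB used name k (pvCand name k) fuel = pvCand name f := by
  induction fuel generalizing k with
  | zero => omega
  | succ fuel ih =>
    by_cases hc : pvCand name k ∈ used
    · have hkne : k ≠ f := fun he => hfree (he ▸ hc)
      simp only [pvFindB, PySem.Set.contains_eq_listContains, List.contains_iff_mem, hc, if_true]
      exact ih (k + 1) (by omega) (by omega) (fun j hj1 hj2 => hbelow j (by omega) hj2)
    · have hkf' : k = f := by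
        by_contra hne
        exact hc (hbelow k (by omega) (by omega))
      simp only [pvFindB, PySem.Set.contains_eq_listContains, List.contains_iff_mem, hc, if_false]
      rw [hkf']

def pvInv (used : PySem.Set String) (nk : PySem.Dict String Int) : Prop :=
  used.Nodup ∧
  (∀ n, PySem.Dict.contains nk n = true → n ∈ used) ∧
  (∀ n ∈ used, 1 ≤ PySem.Dict.getD nk n 1 ∧
    ∀ j : Int, 1 ≤ j → j < PySem.Dict.getD nk n 1 → pvCand n j ∈ used)

theorem pvStep_eq (used : PySem.Set String) (nk : PySem.Dict String Int)
    (res : List String) (name : String) (h : pvInv used nk) :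
    (pvStepA (used, nk, res) name).1 = (pvStepB (used, res) name).1 ∧
    (pvStepA (used, nk, res) name).2.2 = (pvStepB (used, res) name).2 ∧
    pvInv (pvStepA (used, nk, res) name).1 (pvStepA (used, nk, res) name).2.1 := by
  obtain ⟨hnd, hkeys, hval⟩ := h
  by_cases hmem : name ∈ used
  · -- name already used: both probe for the first free suffix
    obtain ⟨f, hf1, hf2, hfree, hbelow⟩ := pvLeastFree used hnd name
    obtain ⟨hk01, hk0below⟩ := hval name hmem
    have hk0f : PySem.Dict.getD nk name 1 ≤ f := by
      by_contra hlt
      exact hfree (hk0below f hf1 (by omega))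
    have hA : pvFindA used name (PySem.Dict.getD nk name 1) (used.length + 1) = f :=
      pvFindA_spec used name _ f _ hk0f (by omega) hfree
        (fun j hj1 hj2 => hbelow j (by omega) hj2)
    have hB : pvFindB used name 1 (pvCand name 1) (used.length + 1) = pvCand name f :=
      pvFindB_spec used name 1 f _ hf1 (by omega) hfree hbelow
    have hcne : pvCand name f ≠ name := fun he => hfree (by rw [he]; exact hmem)
    have hcnk : PySem.Dict.contains nk (pvCand name f) = false := by
      by_contra hb
      exact hfree (hkeys _ (by simpa using hb))
    have hsd : PySem.Dict.setdefault (PySem.Dict.insert nk name (f + 1)) (pvCand name f) 1 =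
        PySem.Dict.insert (PySem.Dict.insert nk name (f + 1)) (pvCand name f) 1 := by
      apply PySem.Dict.setdefault_of_not_contains
      simp [PySem.Dict.contains_insert, hcne, hcnk]
    have hct : List.contains used name = true := by simp [hmem]
    simp only [pvStepA, pvStepB, PySem.Set.contains_eq_listContains, hct,
      Bool.not_true, Bool.false_eq_true, if_false, if_true, hA, hB, hsd]
    refine ⟨trivial, trivial, ?_, ?_, ?_⟩
    · rw [PySem.Set.add_of_not_mem hfree]
      simp [List.nodup_append, hnd]
      intro a ha he
      exact hfree (he ▸ ha)
    · intro n hn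
      rw [PySem.Set.add_of_not_mem hfree]
      rcases String.decEq n (pvCand name f) with hne | heq
      · have hn' : PySem.Dict.contains (PySem.Dict.insert nk name (f + 1)) n = true := by
          simpa [PySem.Dict.contains_insert, (by simp [hne] : (n == pvCand name f) = false)] using hn
        rcases String.decEq n name with hne2 | heq2
        · have : PySem.Dict.contains nk n = true := by
            simpa [PySem.Dict.contains_insert, (by simp [hne2] : (n == name) = false)] using hn'
          exact List.mem_append_left _ (hkeys n this)
        · exact List.mem_append_left _ (heq2 ▸ hmem)
      · exact heq ▸ List.mem_append_right _ (by simp)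
    · intro n hn
      rw [PySem.Set.add_of_not_mem hfree] at hn ⊢
      rw [PySem.Dict.getD_insert, PySem.Dict.getD_insert]
      by_cases hec : n = pvCand name f
      · subst hec
        rw [if_pos rfl]
        exact ⟨le_refl 1, fun j hj1 hj2 => absurd hj2 (by omega)⟩
      · rw [if_neg hec]
        by_cases hen : n = name
        · subst hen
          rw [if_pos rfl]
          refine ⟨by omega, fun j hj1 hj2 => ?_⟩
          by_cases hjf : j = f
          · exact hjf ▸ List.mem_append_right _ (by simp)
          · exact List.mem_append_left _ (hbelow j hj1 (by omega))
        · rw [if_neg hen]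
          have hnu : n ∈ used := by
            rcases List.mem_append.mp hn with h' | h'
            · exact h'
            · exact absurd (by simpa using h') hec
          obtain ⟨hv1, hv2⟩ := hval n hnu
          exact ⟨hv1, fun j hj1 hj2 => List.mem_append_left _ (hv2 j hj1 hj2)⟩
  · -- fresh name: both take it verbatim
    have hnk : PySem.Dict.contains nk name = false := by
      by_contra hb
      exact hmem (hkeys name (by simpa using hb))
    have hsd : PySem.Dict.setdefault nk name 1 = PySem.Dict.insert nk name 1 := by
      apply PySem.Dict.setdefault_of_not_contains
      exact hnk
    have hct : List.contains used name = false := by simp [hmem]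
    simp only [pvStepA, pvStepB, PySem.Set.contains_eq_listContains, hct,
      Bool.not_false, Bool.false_eq_true, if_true, if_false, hsd]
    refine ⟨trivial, trivial, ?_, ?_, ?_⟩
    · rw [PySem.Set.add_of_not_mem hmem]
      simp [List.nodup_append, hnd]
      intro a ha he
      exact hmem (he ▸ ha)
    · intro n hn
      rw [PySem.Set.add_of_not_mem hmem]
      rcases String.decEq n name with hne | heq
      · have : PySem.Dict.contains nk n = true := by
          simpa [PySem.Dict.contains_insert, (by simp [hne] : (n == name) = false)] using hn
        exact List.mem_append_left _ (hkeys n this)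
      · exact heq ▸ List.mem_append_right _ (by simp)
    · intro n hn
      rw [PySem.Set.add_of_not_mem hmem] at hn ⊢
      rw [PySem.Dict.getD_insert]
      by_cases hen : n = name
      · subst hen
        rw [if_pos rfl]
        exact ⟨le_refl 1, fun j hj1 hj2 => absurd hj2 (by omega)⟩
      · rw [if_neg hen]
        have hnu : n ∈ used := by
          rcases List.mem_append.mp hn with h' | h'
          · exact h'
          · exact absurd (by simpa using h') hen
        obtain ⟨hv1, hv2⟩ := hval n hnu
        exact ⟨hv1, fun j hj1 hj2 => List.mem_append_left _ (hv2 j hj1 hj2)⟩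

theorem pvMain (l : List String) : ∀ (used : PySem.Set String) (nk : PySem.Dict String Int)
    (res : List String), pvInv used nk →
    (l.foldl pvStepA (used, nk, res)).2.2 = (l.foldl pvStepB (used, res)).2 := by
  induction l with
  | nil => intro used nk res _; rfl
  | cons name l ih =>
    intro used nk res h
    obtain ⟨h1, h2, h3⟩ := pvStep_eq used nk res name h
    simp only [List.foldl_cons]
    have : pvStepA (used, nk, res) name =
        ((pvStepA (used, nk, res) name).1, (pvStepA (used, nk, res) name).2.1,
         (pvStepA (used, nk, res) name).2.2) := rfl
    rw [this, h1, h2]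
    have hB : pvStepB (used, res) name =
        ((pvStepB (used, res) name).1, (pvStepB (used, res) name).2) := rfl
    conv_rhs => rw [hB]
    exact ih _ _ _ (by rw [← h1]; exact h3)

-- ===== VERDICT (by name: the statement is the Claim_ definition above) =====
theorem assign_unique_nicknames_spec : Claim_equal_assign_unique_nicknames := by
  intro nicknames _
  unfold Spec_assign_unique_nicknames assign_unique_nicknames assign_unique_nicknames_alt
  exact pvMain nicknames PySem.Set.empty PySem.Dict.empty []
    ⟨List.nodup_nil, by simp [PySem.Dict.contains_empty], by simp⟩
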